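-- pv_equiv track=rewrite | github.com/Maxd646/LeetCode-Tracker | leetcode-solutions/ pro 3641-longest-semi-repeating-subarray/solution.py | fre
-- ===== SOURCE A (Python) =====
-- from collections import Counter
--
-- def fre(nums: list[int], k: int) -> int:
--     maxx=left= rep=0
--     count=Counter()
--     for right in range(len(nums)):
--         count[nums[right]]+=1
--         if count[nums[right]]==2:
--             rep+=1
--         while rep>k:
--             if count[nums[left]]==2:
--                 rep-=1
--             count[nums[left]]-=1
--             left+=1
--         maxx=max(maxx, right-left+1)
--     return maxx
-- ===== SOURCE B (Python) =====
-- def fre(nums: list[int], k: int) -> int: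
--     n = len(nums)
--
--     def ok(L: int) -> bool:
--         # does some window of length exactly L have at most k values repeated (count >= 2)?
--         count = {}
--         rep = 0
--         for i, x in enumerate(nums):
--             count[x] = count.get(x, 0) + 1
--             if count[x] == 2:
--                 rep += 1
--             if i >= L:
--                 y = nums[i - L]
--                 if count[y] == 2:
--                     rep -= 1
--                 count[y] -= 1
--             if i >= L - 1 and rep <= k:
--                 return True
--         return False
--
--     lo, hi = 0, n
--     while lo < hi:
--         mid = (lo + hi + 1) // 2
--         if ok(mid):
--             lo = mid
--         else:
--             hi = mid - 1
--     return lo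
-- ===== Notes on version B (the rewrite author's own statement) =====
-- stated objective: alternative
-- what changed: B replaces A's two-pointer sliding window entirely: it binary-searches the answer length L (valid window lengths are downward closed) and for each candidate L runs a fixed-size-window feasibility scan with early return, never maintaining a shrinking window or a running max.
import Mathlib
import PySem

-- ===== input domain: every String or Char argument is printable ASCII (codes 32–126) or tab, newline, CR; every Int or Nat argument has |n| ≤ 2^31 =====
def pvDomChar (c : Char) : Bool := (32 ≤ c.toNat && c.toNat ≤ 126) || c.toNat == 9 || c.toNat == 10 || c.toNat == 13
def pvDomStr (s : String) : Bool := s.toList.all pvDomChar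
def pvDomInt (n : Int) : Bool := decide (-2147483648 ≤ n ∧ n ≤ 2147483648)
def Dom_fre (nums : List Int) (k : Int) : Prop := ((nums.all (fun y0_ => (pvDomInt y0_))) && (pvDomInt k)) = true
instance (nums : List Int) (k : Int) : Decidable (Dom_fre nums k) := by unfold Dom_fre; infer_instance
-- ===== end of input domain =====

-- B replaces A's two-pointer sliding window by a different algorithm: binary search on the
-- answer length with a fixed-size-window feasibility scan (alternative decomposition, O(n log n)).

-- ===== PORT A =====
-- the 'while rep > k' loop; fuel only totalizes it (Python raises IndexError where pyGet? is none — excluded by Pre_)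
def fre_while (nums : List Int) (k : Int) :
    Nat → PySem.Dict Int Int → Int → Int → PySem.Dict Int Int × Int × Int
  | 0, cnt, left, rep => (cnt, left, rep)
  | fuel + 1, cnt, left, rep =>
    if k < rep then
      match PySem.List.pyGet? nums left with
      | none => (cnt, left, rep)   -- IndexError in Python; outside Pre_
      | some y =>
          fre_while nums k fuel (cnt.modify y 0 (· - 1)) (left + 1)
            (if cnt.getD y 0 == 2 then rep - 1 else rep)
    else (cnt, left, rep)

-- the 'for right in range(len(nums))' loop, carrying (count, left, rep, maxx, right)
def fre_loop (nums : List Int) (k : Int) :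
    List Int → PySem.Dict Int Int → Int → Int → Int → Int → Int
  | [], _cnt, _left, _rep, maxx, _right => maxx
  | x :: rest, cnt, left, rep, maxx, right =>
      let cnt1 := cnt.modify x 0 (· + 1)
      let rep1 := if cnt1.getD x 0 == 2 then rep + 1 else rep
      match fre_while nums k (nums.length + 1) cnt1 left rep1 with
      | (cnt2, left2, rep2) =>
          fre_loop nums k rest cnt2 left2 rep2 (max maxx (right - left2 + 1)) (right + 1)

def fre (nums : List Int) (k : Int) : Int :=
  fre_loop nums k nums PySem.Dict.empty 0 0 0 0

-- ===== PORT B =====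
-- the 'for i, x in enumerate(nums)' body of ok(L), with early return on success
def fre_ok_loop (nums : List Int) (k L : Int) :
    List Int → Int → PySem.Dict Int Int → Int → Bool
  | [], _i, _cnt, _rep => false
  | x :: rest, i, cnt, rep =>
      let cnt1 := cnt.insert x (cnt.getD x 0 + 1)
      let rep1 := if cnt1.getD x 0 == 2 then rep + 1 else rep
      let st :=
        if L ≤ i then
          match PySem.List.pyGet? nums (i - L) with
          | some y =>
              ((cnt1.insert y (cnt1.getD y 0 - 1)),
               (if cnt1.getD y 0 == 2 then rep1 - 1 else rep1))
          | none => (cnt1, rep1)   -- unreachable: 0 ≤ i - L < i < len nums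
        else (cnt1, rep1)
      if L - 1 ≤ i ∧ st.2 ≤ k then true
      else fre_ok_loop nums k L rest (i + 1) st.1 st.2

def fre_ok (nums : List Int) (k L : Int) : Bool :=
  fre_ok_loop nums k L nums 0 PySem.Dict.empty 0

-- the 'while lo < hi' binary search; fuel n+1 suffices since hi - lo shrinks each step
def fre_bs (nums : List Int) (k : Int) : Nat → Int → Int → Int
  | 0, lo, _hi => lo
  | fuel + 1, lo, hi =>
      if lo < hi then
        let mid := PySem.Int.floordiv (lo + hi + 1) 2
        if fre_ok nums k mid then fre_bs nums k fuel mid hi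
        else fre_bs nums k fuel lo (mid - 1)
      else lo

def fre_alt (nums : List Int) (k : Int) : Int :=
  fre_bs nums k (nums.length + 1) 0 (nums.length : Int)

-- ===== PRECONDITION & SPEC =====
-- Pre_ excludes k < 0 with nonempty nums, where A's while loop runs off the list and raises IndexError.
def Pre_fre (nums : List Int) (k : Int) : Prop := 0 ≤ k ∨ nums = []
instance (nums : List Int) (k : Int) : Decidable (Pre_fre nums k) := by unfold Pre_fre; infer_instance
def pvWitness_fre : List Int × Int := ([1, 2, 1, 3], 1)

def Spec_fre (nums : List Int) (k : Int) (out : Int) : Prop := out = fre_alt nums k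
instance (nums : List Int) (k : Int) (out : Int) : Decidable (Spec_fre nums k out) := by unfold Spec_fre; infer_instance

-- ===== CLAIM (what is proved, stated in full; the proofs are below) =====
def Claim_equal_fre : Prop := ∀ (nums : List Int) (k : Int), Dom_fre nums k → Pre_fre nums k → Spec_fre nums k (fre nums k)

-- ===== LEMMAS AND PROOFS =====

-- number of distinct values occurring at least twice in w ('rep' of the window)
def repOf (w : List Int) : Nat := (w.toFinset.filter (fun v => 2 ≤ w.count v)).card

-- 'some window of nums of length exactly L has rep ≤ k'
def winGood (nums : List Int) (k : Int) (L : Nat) : Prop :=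
  ∃ i : Nat, i + L ≤ nums.length ∧ (repOf ((nums.drop i).take L) : Int) ≤ k

lemma repOf_congr (w w' : List Int) (hc : ∀ v, w.count v = w'.count v) : repOf w = repOf w' := by
  unfold repOf
  congr 1
  ext v
  simp only [Finset.mem_filter, List.mem_toFinset, ← List.count_pos_iff, hc]

lemma repOf_cons (x : Int) (w : List Int) :
    repOf (x :: w) = repOf w + (if w.count x = 1 then 1 else 0) := by
  unfold repOf
  by_cases h1 : w.count x = 1
  · rw [if_pos h1]
    have hset : (x :: w).toFinset.filter (fun v => 2 ≤ (x :: w).count v)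
        = insert x (w.toFinset.filter (fun v => 2 ≤ w.count v)) := by
      ext v
      by_cases hv : x = v
      · subst hv; simp [List.count_cons, ← List.count_pos_iff]; omega
      · simp [hv, List.count_cons, ← List.count_pos_iff]; omega
    rw [hset, Finset.card_insert_of_notMem (by simp [h1])]
  · rw [if_neg h1, Nat.add_zero]
    have hset : (x :: w).toFinset.filter (fun v => 2 ≤ (x :: w).count v)
        = w.toFinset.filter (fun v => 2 ≤ w.count v) := by
      ext v
      by_cases hv : x = v
      · subst hv; simp [List.count_cons, ← List.count_pos_iff]; omega
      · simp [hv, List.count_cons, ← List.count_pos_iff]; omega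
    rw [hset]

lemma repOf_append (w : List Int) (x : Int) :
    repOf (w ++ [x]) = repOf w + (if w.count x = 1 then 1 else 0) := by
  rw [repOf_congr (w ++ [x]) (x :: w)
        (by intro v; by_cases hv : v = x <;>
          simp [List.count_append, List.count_cons, hv]),
      repOf_cons]

lemma repOf_mono {s t : List Int} (h : List.Sublist s t) : repOf s ≤ repOf t := by
  apply Finset.card_le_card
  intro v hv
  simp only [Finset.mem_filter, List.mem_toFinset] at *
  exact ⟨h.mem hv.1, le_trans hv.2 (h.count_le v)⟩

lemma winGood_mono {nums : List Int} {k : Int} {L M : Nat}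
    (h : winGood nums k L) (hM : M ≤ L) : winGood nums k M := by
  obtain ⟨i, hi, hval⟩ := h
  refine ⟨i, by omega, le_trans ?_ hval⟩
  have hsub : List.Sublist ((nums.drop i).take M) ((nums.drop i).take L) := by
    rw [show ((nums.drop i).take M) = ((nums.drop i).take L).take M by rw [List.take_take]; congr 1; omega]
    exact List.take_sublist _ _
  exact_mod_cast repOf_mono hsub

lemma winGood_zero {nums : List Int} {k : Int} (hk : 0 ≤ k) : winGood nums k 0 :=
  ⟨0, by omega, by simpa [repOf] using hk⟩

lemma winGood_snoc {nums : List Int} {x : Int} {k : Int} {L : Nat}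
    (h : winGood nums k L) : winGood (nums ++ [x]) k L := by
  obtain ⟨i, hi, hval⟩ := h
  refine ⟨i, by simp; omega, ?_⟩
  have hdrop : (nums ++ [x]).drop i = nums.drop i ++ [x] :=
    List.drop_append_of_le_length (by omega)
  rw [hdrop, List.take_append_of_le_length (by simp; omega)]
  exact hval

-- A's inner while loop: produces the minimal valid left pointer (as in the previous analysis)
lemma while_spec (p rest : List Int) (k : Int) (hk : 0 ≤ k) :
    ∀ (fuel : Nat) (l : Nat) (cnt : PySem.Dict Int Int) (rep : Int),
      l ≤ p.length → p.length - l < fuel →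
      (∀ v, cnt.getD v 0 = ((p.drop l).count v : Int)) →
      rep = (repOf (p.drop l) : Int) →
      ∃ (l' : Nat) (cnt' : PySem.Dict Int Int),
        fre_while (p ++ rest) k fuel cnt (l : Int) rep = (cnt', (l' : Int), (repOf (p.drop l') : Int)) ∧
        l ≤ l' ∧ l' ≤ p.length ∧ ((repOf (p.drop l') : Int) ≤ k) ∧
        (∀ m, l ≤ m → m < l' → k < (repOf (p.drop m) : Int)) ∧
        (∀ v, cnt'.getD v 0 = ((p.drop l').count v : Int)) := by
  intro fuel
  induction fuel with
  | zero => intro l cnt rep hl hfuel hcnt hrep; omega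
  | succ fuel ih =>
    intro l cnt rep hl hfuel hcnt hrep
    by_cases hcase : k < rep
    · -- loop body runs
      have hrep0 : 0 < repOf (p.drop l) := by omega
      have hlp : l < p.length := by
        by_contra hle
        have : p.drop l = [] := List.drop_eq_nil_of_le (by omega)
        rw [this] at hrep0; simp [repOf] at hrep0
      have hget : PySem.List.pyGet? (p ++ rest) (l : Int) = some p[l] := by
        rw [PySem.List.pyGet?_natCast]
        rw [List.getElem?_append_left hlp, List.getElem?_eq_getElem hlp]
      have hdrop : p.drop l = p[l] :: p.drop (l + 1) := List.drop_eq_getElem_cons hlp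
      set y := p[l] with hy
      have hcy : cnt.getD y 0 = ((p.drop (l+1)).count y : Int) + 1 := by
        rw [hcnt y, hdrop]; push_cast [List.count_cons]; simp
      have hrep' : (if cnt.getD y 0 == 2 then rep - 1 else rep) = (repOf (p.drop (l+1)) : Int) := by
        have hr : repOf (p.drop l) = repOf (p.drop (l+1)) + (if (p.drop (l+1)).count y = 1 then 1 else 0) := by
          rw [hdrop]; exact repOf_cons y _
        by_cases hc : (p.drop (l+1)).count y = 1
        · rw [if_pos (by rw [beq_iff_eq, hcy, hc]; norm_num)]
          rw [hrep, hr, if_pos hc]; push_cast; ring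
        · rw [if_neg (by rw [beq_iff_eq, hcy]; intro h; exact hc (by omega))]
          rw [hrep, hr, if_neg hc]; push_cast; ring
      have hcnt' : ∀ v, (cnt.modify y 0 (· - 1)).getD v 0 = ((p.drop (l+1)).count v : Int) := by
        intro v
        rw [PySem.Dict.getD_modify]
        by_cases hv : v = y
        · rw [if_pos hv, hv, hcy]; ring
        · rw [if_neg hv, hcnt v, hdrop, List.count_cons]
          simp [Ne.symm hv]
      obtain ⟨l', cnt', hrun, hll', hl'p, hval, hmin, hc'⟩ :=
        ih (l + 1) (cnt.modify y 0 (· - 1)) (if cnt.getD y 0 == 2 then rep - 1 else rep)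
          (by omega) (by omega) hcnt' hrep'
      refine ⟨l', cnt', ?_, by omega, hl'p, hval, ?_, hc'⟩
      · rw [fre_while, if_pos hcase, hget]
        have : ((l : Int) + 1) = ((l + 1 : Nat) : Int) := by push_cast; ring
        rw [this]
        exact hrun
      · intro m hm1 hm2
        rcases Nat.eq_or_lt_of_le hm1 with rfl | hlt
        · omega
        · exact hmin m (by omega) hm2
    · refine ⟨l, cnt, ?_, le_refl l, hl, by omega, by omega, hcnt⟩
      rw [fre_while, if_neg hcase, hrep]

-- A's outer loop computes the largest L with winGood
lemma loopA_spec (k : Int) (hk : 0 ≤ k) :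
    ∀ (rest p : List Int) (cnt : PySem.Dict Int Int) (l M : Nat),
      l ≤ p.length →
      (∀ v, cnt.getD v 0 = ((p.drop l).count v : Int)) →
      ((repOf (p.drop l) : Int) ≤ k) →
      (∀ m, m < l → k < (repOf (p.drop m) : Int)) →
      winGood p k M →
      (∀ L, winGood p k L → L ≤ M) →
      ∃ R : Nat,
        fre_loop (p ++ rest) k rest cnt (l : Int) (repOf (p.drop l)) (M : Int) (p.length : Int) = (R : Int) ∧
        winGood (p ++ rest) k R ∧ (∀ L, winGood (p ++ rest) k L → L ≤ R) := by
  intro rest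
  induction rest with
  | nil =>
    intro p cnt l M _ _ _ _ hgood hbound
    exact ⟨M, by rw [fre_loop], by simpa using hgood, by simpa using hbound⟩
  | cons x rest' ih =>
    intro p cnt l M hl hcnt hval hmin hgood hbound
    set p' : List Int := p ++ [x] with hp'
    have hplen : p'.length = p.length + 1 := by simp [hp']
    have hnums : p ++ x :: rest' = p' ++ rest' := by simp [hp']
    have hdrop' : ∀ m : Nat, m ≤ p.length → p'.drop m = p.drop m ++ [x] := by
      intro m hm; rw [hp', List.drop_append_of_le_length hm]
    have hmono : ∀ m : Nat, m ≤ p.length → repOf (p.drop m) ≤ repOf (p'.drop m) := by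
      intro m hm; rw [hdrop' m hm]; exact repOf_mono (List.sublist_append_left _ _)
    -- A adds x
    have hcntA1 : ∀ v, (cnt.modify x 0 (· + 1)).getD v 0 = ((p'.drop l).count v : Int) := by
      intro v
      rw [PySem.Dict.getD_modify, hdrop' l hl]
      by_cases hv : v = x
      · rw [if_pos hv, hv, hcnt x]; simp [List.count_append]
      · rw [if_neg hv, hcnt v]; simp [List.count_append, Ne.symm hv]
    have hrepA1 : (if (cnt.modify x 0 (· + 1)).getD x 0 == 2 then (repOf (p.drop l) : Int) + 1 else (repOf (p.drop l) : Int))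
        = (repOf (p'.drop l) : Int) := by
      have hr : repOf (p'.drop l) = repOf (p.drop l) + (if (p.drop l).count x = 1 then 1 else 0) := by
        rw [hdrop' l hl]; exact repOf_append _ x
      have hcx : (p'.drop l).count x = (p.drop l).count x + 1 := by
        rw [hdrop' l hl]; simp [List.count_append]
      rw [hcntA1 x, hcx]
      by_cases hc : (p.drop l).count x = 1
      · rw [if_pos (by rw [beq_iff_eq]; norm_num [hc])]
        rw [hr, if_pos hc]; push_cast; ring
      · rw [if_neg (by rw [beq_iff_eq]; push_cast; omega)]
        rw [hr, if_neg hc]; push_cast; ring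
    -- run the while loop over p'
    obtain ⟨l2, cnt2, hrun, hA2, hl2p, hval2, hmin2, hcnt2⟩ :=
      while_spec p' rest' k hk ((p' ++ rest').length + 1) l (cnt.modify x 0 (· + 1))
        ((repOf (p'.drop l) : Int))
        (by omega) (by simp [hp']; omega) hcntA1 rfl
    have hmin' : ∀ m, m < l2 → k < (repOf (p'.drop m) : Int) := by
      intro m hm
      by_cases hmA : m < l
      · exact lt_of_lt_of_le (hmin m hmA) (by exact_mod_cast hmono m (by omega))
      · exact hmin2 m (by omega) hm
    -- the new maximum
    set M' : Nat := max M (p'.length - l2) with hM'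
    have hgood2 : winGood p' k (p'.length - l2) := by
      refine ⟨l2, by omega, ?_⟩
      rw [List.take_of_length_le (by rw [List.length_drop])]
      exact hval2
    have hgood' : winGood p' k M' := by
      rcases max_choice M (p'.length - l2) with h | h
      · rw [hM', h]; exact winGood_snoc hgood
      · rw [hM', h]; exact hgood2
    have hbound' : ∀ L, winGood p' k L → L ≤ M' := by
      rintro L ⟨i, hi, hv⟩
      by_cases hiL : i + L ≤ p.length
      · have : winGood p k L := by
          refine ⟨i, hiL, ?_⟩
          rwa [hdrop' i (by omega), List.take_append_of_le_length (by rw [List.length_drop]; omega)] at hv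
        exact le_trans (hbound L this) (le_max_left _ _)
      · have hiL' : i + L = p'.length := by omega
        have hwin : (p'.drop i).take L = p'.drop i :=
          List.take_of_length_le (by rw [List.length_drop]; omega)
        rw [hwin] at hv
        have hil2 : l2 ≤ i := by
          by_contra hcon
          exact absurd hv (by rw [not_le]; exact hmin' i (by omega))
        calc L = p'.length - i := by omega
          _ ≤ p'.length - l2 := by omega
          _ ≤ M' := le_max_right _ _
    have hmax : max (M : Int) ((p.length : Int) - (l2 : Int) + 1) = (M' : Int) := by
      rw [hM', Nat.cast_max]
      congr 1
      omega
    have hcast : ((p.length : Int) + 1) = (p'.length : Int) := by rw [hplen]; push_cast; ring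
    obtain ⟨R, hR, hRg, hRb⟩ := ih p' cnt2 l2 M' hl2p hcnt2 hval2 hmin' hgood' hbound'
    refine ⟨R, ?_, by rwa [hnums], by rw [hnums]; exact hRb⟩
    rw [hnums, fre_loop]
    simp only [hrepA1, hrun]
    rw [hmax, hcast]
    exact hR

-- B's ok-loop: true iff some full window of length L ending at an index ≥ s is valid
lemma okLoop_spec (nums : List Int) (k : Int) (L : Nat) (hL : 1 ≤ L) :
    ∀ (rest : List Int) (s : Nat) (cnt : PySem.Dict Int Int) (rep : Int),
      nums = nums.take s ++ rest → s ≤ nums.length →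
      (∀ v, cnt.getD v 0 = (((nums.take s).drop (s - L)).count v : Int)) →
      rep = (repOf ((nums.take s).drop (s - L)) : Int) →
      (fre_ok_loop nums k (L : Int) rest (s : Int) cnt rep = true ↔
        ∃ j : Nat, s ≤ j ∧ j < nums.length ∧ L ≤ j + 1 ∧
          (repOf ((nums.take (j+1)).drop (j+1-L)) : Int) ≤ k) := by
  intro rest
  induction rest with
  | nil =>
    intro s cnt rep hsplit hs _ _
    have hsn : s = nums.length := by
      have := congrArg List.length hsplit
      simp at this
      omega
    rw [fre_ok_loop]
    constructor
    · intro h; cases h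
    · rintro ⟨j, hj1, hj2, -, -⟩
      exact absurd hj2 (by omega)
  | cons x rest' ih =>
    intro s cnt rep hsplit hs hcnt hrep
    have hlen : s < nums.length := by
      have := congrArg List.length hsplit
      simp at this
      omega
    have hxs : nums[s]? = some x := by
      conv_lhs => rw [hsplit]
      rw [List.getElem?_append_right (by rw [List.length_take]; omega)]
      rw [List.length_take, show s - min s nums.length = 0 by omega]
      simp
    have hx : nums.take (s + 1) = nums.take s ++ [x] := by
      rw [List.take_add_one, hxs]
      simp
    set w : List Int := (nums.take s).drop (s - L) with hw
    set w' : List Int := (nums.take (s + 1)).drop (s + 1 - L) with hw'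
    -- counts and rep after adding x
    have hcnt1 : ∀ v, (cnt.insert x (cnt.getD x 0 + 1)).getD v 0 = ((w ++ [x]).count v : Int) := by
      intro v
      rw [PySem.Dict.getD_insert]
      by_cases hv : v = x
      · rw [if_pos hv, hv, hcnt x]; simp [List.count_append]
      · rw [if_neg hv, hcnt v]; simp [List.count_append, Ne.symm hv]
    have hrep1 : (if (cnt.insert x (cnt.getD x 0 + 1)).getD x 0 == 2 then rep + 1 else rep)
        = (repOf (w ++ [x]) : Int) := by
      have hr := repOf_append w x
      rw [hcnt1 x]
      by_cases hc : w.count x = 1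
      · rw [if_pos (by rw [beq_iff_eq]; simp [List.count_append, hc])]
        rw [hrep, hr, if_pos hc]; push_cast; ring
      · rw [if_neg (by rw [beq_iff_eq]; simp [List.count_append]; push_cast; omega)]
        rw [hrep, hr, if_neg hc]; push_cast; ring
    -- the removal step yields exactly the window ending at s
    have key : ∃ (cnt2 : PySem.Dict Int Int) (rep2 : Int),
        (if (L : Int) ≤ (s : Int) then
          match PySem.List.pyGet? nums ((s : Int) - (L : Int)) with
          | some y =>
              (((cnt.insert x (cnt.getD x 0 + 1)).insert y ((cnt.insert x (cnt.getD x 0 + 1)).getD y 0 - 1)),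
               (if (cnt.insert x (cnt.getD x 0 + 1)).getD y 0 == 2
                then (if (cnt.insert x (cnt.getD x 0 + 1)).getD x 0 == 2 then rep + 1 else rep) - 1
                else (if (cnt.insert x (cnt.getD x 0 + 1)).getD x 0 == 2 then rep + 1 else rep)))
          | none => (cnt.insert x (cnt.getD x 0 + 1),
                     (if (cnt.insert x (cnt.getD x 0 + 1)).getD x 0 == 2 then rep + 1 else rep))
         else (cnt.insert x (cnt.getD x 0 + 1),
               (if (cnt.insert x (cnt.getD x 0 + 1)).getD x 0 == 2 then rep + 1 else rep)))
          = (cnt2, rep2) ∧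
        (∀ v, cnt2.getD v 0 = (w'.count v : Int)) ∧ rep2 = (repOf w' : Int) := by
      by_cases hLs : L ≤ s
      · have hIle : ((L : Nat) : Int) ≤ ((s : Nat) : Int) := by exact_mod_cast hLs
        have hsL : s - L < nums.length := by omega
        have hget : PySem.List.pyGet? nums ((s : Int) - (L : Int)) = some nums[s - L] := by
          rw [show ((s : Int) - (L : Int)) = ((s - L : Nat) : Int) by omega, PySem.List.pyGet?_natCast,
            List.getElem?_eq_getElem hsL]
        set y := nums[s - L] with hy
        have h1 : w = y :: (nums.take s).drop (s - L + 1) := by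
          rw [hw, List.drop_eq_getElem_cons (by simp; omega)]
          congr 1
          simp [List.getElem_take, hy]
        have h2 : w' = (nums.take s).drop (s - L + 1) ++ [x] := by
          rw [hw', show s + 1 - L = (s - L) + 1 by omega, hx,
            List.drop_append_of_le_length (by simp; omega)]
        have hcons : w ++ [x] = y :: w' := by rw [h1, h2]; simp
        have hcy : (cnt.insert x (cnt.getD x 0 + 1)).getD y 0 = (w'.count y : Int) + 1 := by
          rw [hcnt1 y, hcons]; push_cast [List.count_cons]; simp
        refine ⟨_, _, by rw [if_pos hIle, hget], ?_, ?_⟩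
        · intro v
          rw [PySem.Dict.getD_insert]
          by_cases hv : v = y
          · rw [if_pos hv, hv, hcy]; ring
          · rw [if_neg hv, hcnt1 v, hcons, List.count_cons]
            simp [Ne.symm hv]
        · have hr : repOf (w ++ [x]) = repOf w' + (if w'.count y = 1 then 1 else 0) := by
            rw [hcons]; exact repOf_cons y w'
          by_cases hc : w'.count y = 1
          · rw [if_pos (by rw [beq_iff_eq, hcy, hc]; norm_num)]
            rw [hrep1, hr, if_pos hc]; push_cast; ring
          · rw [if_neg (by rw [beq_iff_eq, hcy]; intro h; exact hc (by omega))]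
            rw [hrep1, hr, if_neg hc]; push_cast; ring
      · have hw'w : w' = w ++ [x] := by
          rw [hw', hw, show s + 1 - L = 0 by omega, show s - L = 0 by omega]
          simp [hx]
        refine ⟨_, _, by rw [if_neg (show ¬ ((L : Nat) : Int) ≤ ((s : Nat) : Int) from by exact_mod_cast hLs)], ?_, ?_⟩
        · intro v; rw [hcnt1 v, hw'w]
        · rw [hrep1, hw'w]
    obtain ⟨cnt2, rep2, hst, hcnt2, hrep2⟩ := key
    rw [fre_ok_loop]
    simp only [hst]
    by_cases hchk : ((L : Nat) : Int) - 1 ≤ ((s : Nat) : Int) ∧ rep2 ≤ k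
    · rw [if_pos hchk]
      simp only [true_iff]
      exact ⟨s, le_refl s, hlen, by omega, by rw [← hrep2]; exact hchk.2⟩
    · rw [if_neg hchk]
      have hsplit' : nums = nums.take (s + 1) ++ rest' := by
        rw [hx]
        conv_lhs => rw [hsplit]
        simp
      have hrec := ih (s + 1) cnt2 rep2 hsplit' (by omega) hcnt2 (by rw [hrep2])
      rw [show ((s : Nat) : Int) + 1 = ((s + 1 : Nat) : Int) by push_cast; ring, hrec]
      constructor
      · rintro ⟨j, hj1, hj2, hj3, hv⟩
        exact ⟨j, by omega, hj2, hj3, hv⟩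
      · rintro ⟨j, hj1, hj2, hj3, hv⟩
        rcases Nat.eq_or_lt_of_le hj1 with rfl | hlt
        · exfalso
          exact hchk ⟨by omega, by rw [hrep2]; exact hv⟩
        · exact ⟨j, by omega, hj2, hj3, hv⟩

lemma ok_spec (nums : List Int) (k : Int) (L : Nat) (hL : 1 ≤ L) :
    fre_ok nums k (L : Int) = true ↔ winGood nums k L := by
  have h0 := okLoop_spec nums k L hL nums 0 PySem.Dict.empty 0
    (by simp) (by omega) (by intro v; simp) (by simp [repOf])
  rw [show ((0 : Nat) : Int) = 0 by norm_num] at h0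
  unfold fre_ok
  rw [h0]
  constructor
  · rintro ⟨j, _, hj2, hj3, hval⟩
    refine ⟨j + 1 - L, by omega, ?_⟩
    rw [List.drop_take, show j + 1 - (j + 1 - L) = L by omega] at hval
    exact hval
  · rintro ⟨i, hi, hval⟩
    refine ⟨i + L - 1, by omega, by omega, by omega, ?_⟩
    rw [show i + L - 1 + 1 = i + L by omega, show i + L - L = i by omega, List.drop_take,
      show i + L - i = L by omega]
    exact hval

lemma bs_spec (nums : List Int) (k : Int) (_hk : 0 ≤ k) :
    ∀ (fuel : Nat) (lo hi : Nat),
      hi ≤ nums.length → hi - lo < fuel →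
      winGood nums k lo → (∀ L, winGood nums k L → L ≤ hi) →
      ∃ R : Nat, fre_bs nums k fuel (lo : Int) (hi : Int) = (R : Int) ∧
        winGood nums k R ∧ (∀ L, winGood nums k L → L ≤ R) := by
  intro fuel
  induction fuel with
  | zero =>
    intro lo hi _ hfuel hgood hbound
    have := hbound lo hgood
    omega
  | succ fuel ih =>
    intro lo hi hhi hfuel hgood hbound
    have hlohi : lo ≤ hi := hbound lo hgood
    by_cases hlt : lo < hi
    · set m : Nat := (lo + hi + 1) / 2 with hm
      have hm1 : lo < m := by omega
      have hm2 : m ≤ hi := by omega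
      have hmid : PySem.Int.floordiv ((lo : Int) + (hi : Int) + 1) 2 = ((m : Nat) : Int) := by
        rw [show ((lo : Int) + (hi : Int) + 1) = (((lo + hi + 1 : Nat)) : Int) by push_cast; ring]
        exact_mod_cast PySem.Int.floordiv_natCast (lo + hi + 1) 2
      rw [fre_bs, if_pos (show (lo : Int) < (hi : Int) by exact_mod_cast hlt)]
      simp only [hmid]
      by_cases hok : fre_ok nums k ((m : Nat) : Int) = true
      · rw [if_pos hok]
        apply ih m hi hhi (by omega) ((ok_spec nums k m (by omega)).mp hok) hbound
      · rw [if_neg hok]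
        rw [show ((m : Nat) : Int) - 1 = ((m - 1 : Nat) : Int) by omega]
        apply ih lo (m - 1) (by omega) (by omega) hgood
        intro L hLg
        by_contra hcon
        exact hok ((ok_spec nums k m (by omega)).mpr (winGood_mono hLg (by omega)))
    · have : lo = hi := by omega
      subst this
      exact ⟨lo, by rw [fre_bs, if_neg (by omega)], hgood, fun L h => hbound L h⟩

-- ===== VERDICT (by name: the statement is the Claim_ definition above) =====
theorem fre_spec : Claim_equal_fre := by
  intro nums k _ hpre
  unfold Spec_fre
  rcases hpre with hk | rfl
  · obtain ⟨RA, hA, hgA, hbA⟩ := loopA_spec k hk nums [] PySem.Dict.empty 0 0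
      (by simp) (by intro v; simp) (by simpa [repOf] using hk) (by intro m hm; omega)
      (winGood_zero hk) (by intro L hl; obtain ⟨i, hi, _⟩ := hl; simp at hi; omega)
    obtain ⟨RB, hB, hgB, hbB⟩ := bs_spec nums k hk (nums.length + 1) 0 nums.length
      (le_refl _) (by omega) (winGood_zero hk)
      (by intro L hl; obtain ⟨i, hi, _⟩ := hl; omega)
    have : RA = RB := le_antisymm (hbB _ (by simpa using hgA)) (hbA _ (by simpa using hgB))
    simp only [fre, fre_alt]
    simp only [List.nil_append, List.drop_nil, List.length_nil, Nat.cast_zero, repOf] at hA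
    simp only [Nat.cast_zero] at hB
    simp only [List.toFinset_nil, Finset.filter_empty, Finset.card_empty, Nat.cast_zero] at hA
    rw [hA, hB, this]
  · simp [fre, fre_alt, fre_loop, fre_bs]
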